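-- pv_equiv track=rewrite | github.com/ZeroSumQuant/CAKE | cake/utils/cross_task_knowledge_ledger.py | _categorize_task_type
-- ===== SOURCE A (Python) =====
-- def _categorize_task_type(task_description: str) -> str:
--     """Categorize task type from description."""
--     desc_lower = task_description.lower()
--
--     if any(word in desc_lower for word in ["api", "endpoint", "rest"]):
--         return "api_development"
--     elif any(word in desc_lower for word in ["data", "analysis", "csv"]):
--         return "data_processing"
--     elif any(word in desc_lower for word in ["test", "testing"]):
--         return "testing"
--     elif any(word in desc_lower for word in ["fix", "bug", "error"]):
--         return "bug_fix"
--     else: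
--         return "general_development"
-- ===== SOURCE B (Python) =====
-- # Aggregate-then-select: scan ALL keywords, keep the minimal category priority
-- # among matches, then select the category by that index (no early-return chain).
-- _KEYWORD_PRIORITY = {
--     "api": 0, "endpoint": 0, "rest": 0,
--     "data": 1, "analysis": 1, "csv": 1,
--     "test": 2, "testing": 2,
--     "fix": 3, "bug": 3, "error": 3,
-- }
-- _CATEGORIES = [
--     "api_development", "data_processing", "testing", "bug_fix",
--     "general_development",
-- ]
--
--
-- def _categorize_task_type(task_description: str) -> str:
--     desc_lower = task_description.lower()
--     best = len(_CATEGORIES) - 1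
--     for keyword, priority in _KEYWORD_PRIORITY.items():
--         if priority < best and keyword in desc_lower:
--             best = priority
--     return _CATEGORIES[best]
-- ===== Notes on version B (the rewrite author's own statement) =====
-- stated objective: alternative
-- what changed: Instead of an early-return if/elif chain over keyword groups, B folds over a flat keyword-to-priority map, accumulating the minimum matched priority, and selects the category from a list by that index at the end.
import Mathlib
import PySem

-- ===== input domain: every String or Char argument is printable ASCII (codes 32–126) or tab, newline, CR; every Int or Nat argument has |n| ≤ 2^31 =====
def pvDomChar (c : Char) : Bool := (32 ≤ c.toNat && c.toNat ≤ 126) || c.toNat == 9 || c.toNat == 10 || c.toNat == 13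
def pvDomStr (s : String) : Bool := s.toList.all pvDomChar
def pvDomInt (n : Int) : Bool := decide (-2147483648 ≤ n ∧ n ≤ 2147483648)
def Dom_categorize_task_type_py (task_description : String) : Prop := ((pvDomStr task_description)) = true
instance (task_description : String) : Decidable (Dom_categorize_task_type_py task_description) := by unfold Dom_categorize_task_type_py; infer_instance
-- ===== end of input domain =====

-- B replaces the early-return if/elif chain by a single fold over a flat keyword→priority
-- map accumulating the minimum matched priority, then selects the category by index.
-- ===== PORT A =====
def categorize_task_type_py (task_description : String) : String :=
  let desc_lower := PySem.Str.lower task_description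
  if ["api", "endpoint", "rest"].any (fun word => PySem.Str.isIn word desc_lower) then
    "api_development"
  else if ["data", "analysis", "csv"].any (fun word => PySem.Str.isIn word desc_lower) then
    "data_processing"
  else if ["test", "testing"].any (fun word => PySem.Str.isIn word desc_lower) then
    "testing"
  else if ["fix", "bug", "error"].any (fun word => PySem.Str.isIn word desc_lower) then
    "bug_fix"
  else
    "general_development"

-- ===== PORT B =====
-- the loop body of Source B's for-loop, as a named step function
def pvF (d : String) (b : Int) (kp : String × Int) : Int :=
  if kp.2 < b && PySem.Str.isIn kp.1 d then kp.2 else b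

-- Source B's _KEYWORD_PRIORITY dict, as its .items() list (insertion order)
def pvKeywordPriority : List (String × Int) :=
  [("api", 0), ("endpoint", 0), ("rest", 0),
   ("data", 1), ("analysis", 1), ("csv", 1),
   ("test", 2), ("testing", 2),
   ("fix", 3), ("bug", 3), ("error", 3)]

def pvCategories : List String :=
  ["api_development", "data_processing", "testing", "bug_fix", "general_development"]

def categorize_task_type_py_alt (task_description : String) : String :=
  let desc_lower := PySem.Str.lower task_description
  let best : Int :=
    pvKeywordPriority.foldl (pvF desc_lower) ((pvCategories.length : Int) - 1)
  -- _CATEGORIES[best]; best is always in range (0..4), so the .getD default is never used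
  (PySem.List.pyGet? pvCategories best).getD ""

-- ===== PRECONDITION & SPEC =====
def Spec_categorize_task_type_py (task_description : String) (out : String) : Prop := out = categorize_task_type_py_alt task_description
instance (task_description : String) (out : String) : Decidable (Spec_categorize_task_type_py task_description out) := by unfold Spec_categorize_task_type_py; infer_instance

-- ===== CLAIM (what is proved, stated in full; the proofs are below) =====
def Claim_equal_categorize_task_type_py : Prop := ∀ (task_description : String), Dom_categorize_task_type_py task_description → Spec_categorize_task_type_py task_description (categorize_task_type_py task_description)

-- ===== LEMMAS AND PROOFS =====

-- folding a group of keywords that all carry the same priority p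
theorem pvFold_const (d : String) (p : Int) (ks : List String) : ∀ b : Int,
    List.foldl (pvF d) b (ks.map (fun k => (k, p))) =
      if p < b ∧ ks.any (fun k => PySem.Str.isIn k d) = true then p else b := by
  induction ks with
  | nil => intro b; simp
  | cons k ks ih =>
    intro b
    simp only [List.map, List.foldl, List.any_cons]
    rw [ih]
    by_cases h : PySem.Str.isIn k d = true
    · simp only [pvF, h, Bool.and_true]
      split_ifs <;> simp_all
    · simp only [PySem.Str.isIn_eq] at h
      simp [pvF, h]

theorem pvTable_split :
    pvKeywordPriority =
      (["api", "endpoint", "rest"].map (fun k => (k, (0 : Int)))) ++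
      (["data", "analysis", "csv"].map (fun k => (k, (1 : Int)))) ++
      (["test", "testing"].map (fun k => (k, (2 : Int)))) ++
      (["fix", "bug", "error"].map (fun k => (k, (3 : Int)))) := rfl

-- ===== VERDICT (by name: the statement is the Claim_ definition above) =====
theorem categorize_task_type_py_spec : Claim_equal_categorize_task_type_py := by
  intro s _
  unfold Spec_categorize_task_type_py
  simp only [categorize_task_type_py, categorize_task_type_py_alt]
  generalize PySem.Str.lower s = d
  rw [pvTable_split]
  simp only [List.foldl_append]
  rw [pvFold_const, pvFold_const, pvFold_const, pvFold_const]
  rcases hA : ["api", "endpoint", "rest"].any (fun k => PySem.Str.isIn k d) <;>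
  rcases hD : ["data", "analysis", "csv"].any (fun k => PySem.Str.isIn k d) <;>
  rcases hT : ["test", "testing"].any (fun k => PySem.Str.isIn k d) <;>
  rcases hB : ["fix", "bug", "error"].any (fun k => PySem.Str.isIn k d) <;>
  simp_all [pvCategories, PySem.List.pyGet?, PySem.List.pyIdx?]
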